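-- pv_equiv track=rewrite | github.com/michaldziwisz/apollo | addon/synthDrivers/apollo2/formants.py | get_formant_diff_commands
-- ===== SOURCE A (Python) =====
-- from typing import Sequence
--
-- def get_formant_adjust_commands(index: int, diff: int) -> list[str]:
-- 	if not diff:
-- 		return []
-- 	sign = "+" if diff > 0 else "-"
-- 	remaining = abs(int(diff))
-- 	commands: list[str] = []
-- 	while remaining > 0:
-- 		chunk = min(0xFF, remaining)
-- 		commands.append(f"@u{index}{chunk:02X}{sign} ")
-- 		remaining -= chunk
-- 	return commands
--
-- def get_formant_diff_commands(desired: Sequence[int], applied: Sequence[int]) -> list[str]: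
-- 	commands: list[str] = []
-- 	for index, delta in enumerate(desired):
-- 		try:
-- 			current = int(applied[index])
-- 		except Exception:
-- 			current = 0
-- 		diff = int(delta) - current
-- 		if diff:
-- 			commands.extend(get_formant_adjust_commands(index, diff))
-- 	return commands
-- ===== SOURCE B (Python) =====
-- def get_formant_diff_commands(desired, applied):
--     n = len(applied)
--     diffs = [(i, int(d) - (int(applied[i]) if i < n else 0)) for i, d in enumerate(desired)]
--     out = []
--     for i, diff in diffs:
--         if diff:
--             sign = "+" if diff > 0 else "-"
--             q, r = divmod(abs(diff), 255)
--             out += [f"@u{i}FF{sign} "] * q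
--             if r:
--                 out.append(f"@u{i}{r:02X}{sign} ")
--     return out
-- ===== Notes on version B (the rewrite author's own statement) =====
-- stated objective: simpler
-- what changed: Replaces the try/except indexing and the inner while-loop that emits one command per 255-subtraction step with a bounds-checked lookup and a closed-form divmod(|diff|, 255): q replicated 'FF' commands plus one remainder command.
import Mathlib
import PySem

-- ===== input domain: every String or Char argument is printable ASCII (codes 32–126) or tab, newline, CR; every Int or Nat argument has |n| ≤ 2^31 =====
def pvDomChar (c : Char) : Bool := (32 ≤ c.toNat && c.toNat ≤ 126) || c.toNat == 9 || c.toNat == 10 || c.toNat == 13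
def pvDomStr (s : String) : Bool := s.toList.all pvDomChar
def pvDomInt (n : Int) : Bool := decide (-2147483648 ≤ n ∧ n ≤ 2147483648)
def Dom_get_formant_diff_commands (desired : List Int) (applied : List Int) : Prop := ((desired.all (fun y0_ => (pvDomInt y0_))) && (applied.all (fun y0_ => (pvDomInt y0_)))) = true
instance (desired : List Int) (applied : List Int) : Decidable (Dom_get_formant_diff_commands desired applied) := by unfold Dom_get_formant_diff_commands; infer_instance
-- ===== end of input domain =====

-- B replaces A's inner while-loop chunking with a closed form (divmod by 255 → q copies of the FF
-- command plus an optional remainder command) over a precomputed (index, diff) list; objective: simpler.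

-- ===== PORT A =====
-- f"{chunk:02X}" for 0 ≤ chunk ≤ 255: exact (two uppercase hex digits, zero-padded)
def pvHexDigit (n : Nat) : Char := ("0123456789ABCDEF".toList).getD n '0'
def pvHex2 (n : Nat) : String := String.ofList [pvHexDigit (n / 16), pvHexDigit (n % 16)]

-- the 'while remaining > 0' loop of get_formant_adjust_commands
def pvChunksA (index : Int) (sign : String) : Nat → List String
  | 0 => []
  | (r + 1) =>
      ("@u" ++ PySem.Int.toStr index ++ pvHex2 (min 255 (r + 1)) ++ sign ++ " ")
        :: pvChunksA index sign ((r + 1) - min 255 (r + 1))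
  decreasing_by omega

def get_formant_adjust_commands (index : Int) (diff : Int) : List String :=
  if diff = 0 then []
  else
    let sign := if diff > 0 then "+" else "-"
    pvChunksA index sign diff.natAbs

def get_formant_diff_commands (desired : List Int) (applied : List Int) : List String :=
  (PySem.List.enumerate desired).foldl
    (fun commands p =>
      -- try: current = int(applied[index]) except: current = 0
      let current := (PySem.List.pyGet? applied p.1).getD 0
      let diff := p.2 - current
      if diff ≠ 0 then commands ++ get_formant_adjust_commands p.1 diff else commands)
    []

-- ===== PORT B =====
def get_formant_diff_commands_alt (desired : List Int) (applied : List Int) : List String :=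
  let n := applied.length
  let diffs := (PySem.List.enumerate desired).map
    (fun p => (p.1, p.2 - (if p.1 < (n : Int) then applied.getD p.1.toNat 0 else 0)))
  diffs.foldl
    (fun out p =>
      if p.2 ≠ 0 then
        let sign := if p.2 > 0 then "+" else "-"
        let q := p.2.natAbs / 255
        let r := p.2.natAbs % 255
        (out ++ List.replicate q ("@u" ++ PySem.Int.toStr p.1 ++ "FF" ++ sign ++ " ")) ++
          (if r ≠ 0 then ["@u" ++ PySem.Int.toStr p.1 ++ pvHex2 r ++ sign ++ " "] else [])
      else out)
    []

-- ===== PRECONDITION & SPEC =====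
def Spec_get_formant_diff_commands (desired : List Int) (applied : List Int) (out : List String) : Prop := out = get_formant_diff_commands_alt desired applied
instance (desired : List Int) (applied : List Int) (out : List String) : Decidable (Spec_get_formant_diff_commands desired applied out) := by unfold Spec_get_formant_diff_commands; infer_instance

-- ===== CLAIM (what is proved, stated in full; the proofs are below) =====
def Claim_equal_get_formant_diff_commands : Prop := ∀ (desired : List Int) (applied : List Int), Dom_get_formant_diff_commands desired applied → Spec_get_formant_diff_commands desired applied (get_formant_diff_commands desired applied)

-- ===== LEMMAS AND PROOFS =====

lemma pvHex2_255 : pvHex2 255 = "FF" := by decide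

-- closed form for A's while-loop
lemma pvChunksA_closed (index : Int) (sign : String) (m : Nat) :
    pvChunksA index sign m =
      List.replicate (m / 255) ("@u" ++ PySem.Int.toStr index ++ "FF" ++ sign ++ " ") ++
        (if m % 255 ≠ 0 then ["@u" ++ PySem.Int.toStr index ++ pvHex2 (m % 255) ++ sign ++ " "] else []) := by
  induction m using Nat.strong_induction_on with
  | _ m ih =>
    match m with
    | 0 => simp [pvChunksA]
    | (r + 1) =>
      rw [pvChunksA]
      by_cases h : r + 1 ≤ 255
      · have hmin : min 255 (r + 1) = r + 1 := by omega
        rw [hmin]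
        simp only [Nat.sub_self, pvChunksA]
        by_cases h255 : r + 1 = 255
        · have hr : r = 254 := by omega
          subst hr
          simp [pvHex2_255]
        · have h1 : (r + 1) / 255 = 0 := by omega
          have h2 : (r + 1) % 255 = r + 1 := by omega
          simp [h1, h2]
      · have hmin : min 255 (r + 1) = 255 := by omega
        rw [hmin, ih ((r + 1) - 255) (by omega)]
        have h1 : (r + 1) / 255 = ((r + 1) - 255) / 255 + 1 := by omega
        have h2 : (r + 1) % 255 = ((r + 1) - 255) % 255 := by omega
        rw [h1, h2, List.replicate_succ, pvHex2_255]
        simp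

lemma pvCurrent_eq (applied : List Int) (i : Int) (hi : 0 ≤ i) :
    (PySem.List.pyGet? applied i).getD 0 =
      (if i < (applied.length : Int) then applied.getD i.toNat 0 else 0) := by
  by_cases h : i < (applied.length : Int)
  · rw [PySem.List.pyGet?_eq_some_getElem applied hi h]
    rw [List.getD_eq_getElem?_getD, List.getElem?_eq_getElem (by omega)]
    simp [h]
  · have hn : ¬ PySem.Raise.InRange applied.length i := by
      simp [PySem.Raise.InRange]; omega
    rw [(PySem.List.pyGet?_eq_none_iff _ _).mpr hn]
    simp [h]

-- ===== VERDICT (by name: the statement is the Claim_ definition above) =====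
theorem get_formant_diff_commands_spec : Claim_equal_get_formant_diff_commands := by
  intro desired applied _
  unfold Spec_get_formant_diff_commands
  unfold get_formant_diff_commands get_formant_diff_commands_alt
  rw [List.foldl_map]
  apply PySem.List.foldl_congr_mem
  intro acc p hp
  obtain ⟨k, hk, rfl⟩ := (PySem.List.mem_enumerate_iff _ _ _).mp hp
  simp only
  rw [pvCurrent_eq applied _ (by omega)]
  set diff := desired[k] - (if (0 + (k : Int)) < (applied.length : Int)
      then applied.getD (0 + (k : Int)).toNat 0 else 0) with hdiff
  by_cases hd : diff = 0
  · simp [hd]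
  · simp only [hd, ne_eq, not_false_eq_true, if_true]
    unfold get_formant_adjust_commands
    rw [if_neg hd, pvChunksA_closed]
    simp [List.append_assoc]
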